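-- pv_equiv track=rewrite | github.com/mikelmcdaniel/mikelmcdaniel.github.io | blog/2022-11-13/middle_order.py | _middle_order_ranges
-- ===== SOURCE A (Python) =====
-- from typing import Iterator, Tuple
--
-- def _middle_order_ranges(n: int) -> Iterator[Tuple[int, int]]:
--   """Yield all left and right ranges in [0, n) in middle order using recursion.
--
--   This strategy is actually the same as the queue strategy in disguise! Instead
--   of maintaining a queue in memory, we use recursion to see what our earlier
--   ranges are that we need to process.
--
--   Each range is then processed by yielding the left and right sub-ranges.
--
--   Since we only recurse once *and* only iterate over 1/2 of the numbers in the
--   recursive call as what we yield, this function uses O(n + n/2 + n/4 + ...) =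
--   O(n) time and O(log2(n)) space.
--   """
--   yield 0, n
--   # This loop will execute at most n / 2 times
--   for lo, hi in _middle_order_ranges(n):
--     mid = (lo + hi) // 2
--     if not mid:  # Without this if-statement, we would recurse infinitely
--       return
--     if mid + 1 != hi:
--       yield mid + 1, hi
--     if lo != mid:
--       yield lo, mid
-- ===== SOURCE B (Python) =====
-- from typing import Iterator, Tuple
--
--
-- def _children(lo: int, hi: int) -> Iterator[Tuple[int, int]]:
--   mid = (lo + hi) // 2
--   if mid + 1 != hi:
--     yield mid + 1, hi
--   if lo != mid:
--     yield lo, mid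
--
--
-- def _middle_order_ranges(n: int) -> Iterator[Tuple[int, int]]:
--   """Yield ranges in [0, n) in middle (BFS) order, one whole level at a time.
--
--   Instead of the self-consuming generator recursion, materialize each BFS
--   level as a list, yield it wholesale, and build the next level from the
--   children of every range; stop after the level whose last range (the one
--   starting at 0) has midpoint 0.
--   """
--   level = [(0, n)]
--   while True:
--     yield from level
--     lo, hi = level[-1]
--     if (lo + hi) // 2 == 0:
--       return
--     level = [c for rng in level for c in _children(*rng)]
-- ===== Notes on version B (the rewrite author's own statement) =====
-- stated objective: alternative
-- what changed: Replaces the self-consuming generator recursion (a stack of nested generators acting as an implicit queue) with an explicit level-by-level BFS: each level is materialized as a list and yielded wholesale, the next level is the concatenation of every range's children, and iteration stops after the level whose last range (the zero-based one) has a zero midpoint; Pre_ excludes negative n, where consuming either generator never terminates.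
import Mathlib
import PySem

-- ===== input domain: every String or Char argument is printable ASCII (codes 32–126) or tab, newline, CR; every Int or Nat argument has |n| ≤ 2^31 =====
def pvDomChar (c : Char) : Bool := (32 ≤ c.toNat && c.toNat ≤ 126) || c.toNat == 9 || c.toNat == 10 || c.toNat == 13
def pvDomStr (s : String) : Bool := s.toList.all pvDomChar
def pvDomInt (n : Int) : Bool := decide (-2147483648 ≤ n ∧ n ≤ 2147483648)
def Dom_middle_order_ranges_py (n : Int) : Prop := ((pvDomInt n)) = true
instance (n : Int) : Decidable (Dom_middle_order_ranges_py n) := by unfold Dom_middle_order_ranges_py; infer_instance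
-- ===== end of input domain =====

-- B replaces the self-consuming generator recursion by an explicit level-by-level BFS;
-- the materialised output streams are proved equal for all n ≥ 0.

-- ===== PORT A =====
-- A's generator first yields the full range and then iterates over its own output stream, yielding
-- the children of each consumed element until it consumes an element with mid = 0, at which point
-- it returns.  We model the stream with the pair (produced, todo): `produced` is everything yielded
-- so far, `todo` the suffix of the stream the inner for-loop has not consumed yet; `fuel` only makes
-- the recursion structural (it is never exhausted for n ≥ 0 with the fuel chosen below).
def pyA_loop (fuel : Nat) (produced todo : List (Int × Int)) : List (Int × Int) :=
  match fuel with
  | 0 => produced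
  | f + 1 =>
    match todo with
    | [] => produced
    | (lo, hi) :: rest =>
      let mid := PySem.Int.floordiv (lo + hi) 2
      if mid = 0 then produced
      else
        let ch := (if mid + 1 ≠ hi then [(mid + 1, hi)] else []) ++
                  (if lo ≠ mid then [(lo, mid)] else [])
        pyA_loop f (produced ++ ch) (rest ++ ch)

def middle_order_ranges_py (n : Int) : List (Int × Int) :=
  pyA_loop (2 * n + 4).toNat [(0, n)] [(0, n)]

-- ===== PORT B =====
-- Source B helper _children: the (at most two) child ranges of one range.
def pyB_children (p : Int × Int) : List (Int × Int) :=
  (if PySem.Int.floordiv (p.1 + p.2) 2 + 1 ≠ p.2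
     then [(PySem.Int.floordiv (p.1 + p.2) 2 + 1, p.2)] else []) ++
  (if p.1 ≠ PySem.Int.floordiv (p.1 + p.2) 2
     then [(p.1, PySem.Int.floordiv (p.1 + p.2) 2)] else [])

-- Source B main loop: yield the whole current level, stop if the midpoint of level[-1] is 0,
-- otherwise recurse on the concatenated children of the level.  `fuel` bounds the number of
-- loop iterations (levels); the `none` branch (level[-1] of an empty level) is unreachable
-- for n ≥ 0.
def pyB_levels (fuel : Nat) (level : List (Int × Int)) : List (Int × Int) :=
  match fuel with
  | 0 => []
  | f + 1 =>
    level ++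
      match level.getLast? with
      | none => []
      | some (lo, hi) =>
        if PySem.Int.floordiv (lo + hi) 2 = 0 then []
        else pyB_levels f (level.flatMap pyB_children)

def middle_order_ranges_py_alt (n : Int) : List (Int × Int) :=
  pyB_levels (n.toNat + 2) [(0, n)]

-- ===== PRECONDITION & SPEC =====
-- Pre_ excludes negative n: there consuming A's generator to exhaustion never terminates (it keeps
-- yielding degenerate ranges forever), and B diverges identically; A returns on every n ≥ 0.
def Pre_middle_order_ranges_py (n : Int) : Prop := 0 ≤ n
instance (n : Int) : Decidable (Pre_middle_order_ranges_py n) := by unfold Pre_middle_order_ranges_py; infer_instance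
def pvWitness_middle_order_ranges_py : Int := 5

def Spec_middle_order_ranges_py (n : Int) (out : List (Int × Int)) : Prop := out = middle_order_ranges_py_alt n
instance (n : Int) (out : List (Int × Int)) : Decidable (Spec_middle_order_ranges_py n out) := by unfold Spec_middle_order_ranges_py; infer_instance

-- ===== CLAIM (what is proved, stated in full; the proofs are below) =====
def Claim_equal_middle_order_ranges_py : Prop := ∀ (n : Int), Dom_middle_order_ranges_py n → Pre_middle_order_ranges_py n → Spec_middle_order_ranges_py n (middle_order_ranges_py n)

-- ===== LEMMAS AND PROOFS =====

-- sum of the sizes of the ranges in a level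
def sizeSum (l : List (Int × Int)) : Int := (l.map (fun p => p.2 - p.1)).sum

lemma mid_bounds (lo hi : Int) :
    2 * PySem.Int.floordiv (lo + hi) 2 ≤ lo + hi ∧
    lo + hi ≤ 2 * PySem.Int.floordiv (lo + hi) 2 + 1 := by
  have h := PySem.Int.floordiv_mul_add_mod (lo + hi) 2
  have h1 : 0 ≤ PySem.Int.mod (lo + hi) 2 :=
    PySem.Int.mod_nonneg (a := lo + hi) (b := 2) (by norm_num)
  have h2 : PySem.Int.mod (lo + hi) 2 < 2 :=
    PySem.Int.mod_lt (a := lo + hi) (b := 2) (by norm_num)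
  omega

-- A consumes a run q1 of elements whose mid is nonzero, appending their children to both
-- produced and todo (exact-fuel form).
lemma stepA : ∀ (q1 : List (Int × Int)) (f : Nat) (produced q2 : List (Int × Int)),
    (∀ p ∈ q1, PySem.Int.floordiv (p.1 + p.2) 2 ≠ 0) →
    pyA_loop (q1.length + f) produced (q1 ++ q2) =
      pyA_loop f (produced ++ q1.flatMap pyB_children) (q2 ++ q1.flatMap pyB_children) := by
  intro q1
  induction q1 with
  | nil => intro f produced q2 _; simp
  | cons p q1' ih =>
    intro f produced q2 hmid
    obtain ⟨lo, hi⟩ := p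
    have hm : PySem.Int.floordiv (lo + hi) 2 ≠ 0 := hmid (lo, hi) (by simp)
    have hfuel : ((lo, hi) :: q1').length + f = (q1'.length + f) + 1 := by
      simp only [List.length_cons]; omega
    rw [hfuel]
    show pyA_loop ((q1'.length + f) + 1) produced ((lo, hi) :: (q1' ++ q2)) = _
    simp only [pyA_loop, if_neg hm]
    have hrec := ih f (produced ++ pyB_children (lo, hi)) (q2 ++ pyB_children (lo, hi))
      (fun p hp => hmid p (by simp [hp]))
    simp only [pyB_children, List.append_assoc] at hrec ⊢
    simpa [List.flatMap_cons, pyB_children, List.append_assoc] using hrec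

-- size/shape facts about the children of one range
lemma children_len (p : Int × Int) : (pyB_children p).length ≤ 2 := by
  unfold pyB_children
  split_ifs <;> simp

lemma children_sizeSum (p : Int × Int) (h : p.1 < p.2) :
    sizeSum (pyB_children p) ≤ p.2 - p.1 - 1 := by
  obtain ⟨lo, hi⟩ := p
  simp only at h
  have hb := mid_bounds lo hi
  unfold pyB_children sizeSum
  split_ifs <;> simp <;> omega

lemma flat_len : ∀ (l : List (Int × Int)),
    (l.flatMap pyB_children).length ≤ 2 * l.length := by
  intro l
  induction l with
  | nil => simp
  | cons p t ih =>
    have := children_len p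
    simp only [List.flatMap_cons, List.length_append, List.length_cons]
    omega

lemma flat_sizeSum : ∀ (l : List (Int × Int)), (∀ p ∈ l, p.1 < p.2) →
    sizeSum (l.flatMap pyB_children) ≤ sizeSum l - l.length := by
  intro l
  induction l with
  | nil => intro _; simp [sizeSum]
  | cons p t ih =>
    intro hlt
    have h1 := children_sizeSum p (hlt p (by simp))
    have h2 := ih (fun q hq => hlt q (by simp [hq]))
    simp only [List.flatMap_cons, sizeSum, List.map_append, List.sum_append,
      List.map_cons, List.sum_cons, List.length_cons] at *
    push_cast
    omega

-- one iteration of B's level loop, for a level ending in its 0-range with nonzero midpoint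
lemma levels_step (f : Nat) (q1 : List (Int × Int)) (h : Int)
    (hz : PySem.Int.floordiv (0 + h) 2 ≠ 0) :
    pyB_levels (f + 1) (q1 ++ [(0, h)]) =
      (q1 ++ [(0, h)]) ++ pyB_levels f ((q1 ++ [(0, h)]).flatMap pyB_children) := by
  have hlast : (q1 ++ [((0:Int), h)]).getLast? = some (0, h) := by
    simp [List.getLast?_append]
  simp only [pyB_levels, hlast]
  rw [if_neg hz]

-- the main correspondence: consuming one BFS level of A equals one iteration of B's loop
lemma main_lemma : ∀ (fb : Nat), ∀ (fa : Nat) (P q1 : List (Int × Int)) (h : Int),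
    1 ≤ h →
    (∀ p ∈ q1, 1 ≤ p.1 ∧ p.1 < p.2 ∧ h - 1 ≤ p.2 - p.1 ∧ p.2 - p.1 ≤ h) →
    h.toNat < fb →
    ((q1 ++ [(0, h)]).length : Int) + 2 * sizeSum (q1 ++ [(0, h)]) ≤ (fa : Int) →
    pyA_loop fa (P ++ (q1 ++ [(0, h)])) (q1 ++ [(0, h)]) =
      P ++ pyB_levels fb (q1 ++ [(0, h)]) := by
  intro fb
  induction fb with
  | zero => intro fa P q1 h h1 _ hfb _; omega
  | succ fb' ih =>
    intro fa P q1 h h1 hq1 hfb hfa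
    have hS1 : ∀ p ∈ q1, (1:Int) ≤ p.2 - p.1 := fun p hp => by have := hq1 p hp; omega
    have hSnn : 0 ≤ sizeSum q1 := by
      unfold sizeSum
      refine List.sum_nonneg ?_
      intro x hx
      obtain ⟨p, hp, rfl⟩ := List.mem_map.1 hx
      have := hS1 p hp; omega
    have hmidh := mid_bounds 0 h
    set m := PySem.Int.floordiv (0 + h) 2 with hm
    have hlast : (q1 ++ [((0:Int), h)]).getLast? = some (0, h) := by
      simp [List.getLast?_append]
    by_cases hz : m = 0
    · -- h = 1: all level elements have size 1 and no children; A stops on (0,1)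
      have hh1 : h = 1 := by omega
      subst hh1
      have hSS : sizeSum (q1 ++ [((0:Int), 1)]) = sizeSum q1 + 1 := by
        simp [sizeSum]
      have hch : q1.flatMap pyB_children = [] := by
        refine List.flatMap_eq_nil_iff.2 ?_
        intro p hp
        have hc := hq1 p hp
        obtain ⟨lo, hi⟩ := p
        simp only at hc
        have hhi : hi = lo + 1 := by omega
        subst hhi
        have hb := mid_bounds lo (lo + 1)
        have hmid : PySem.Int.floordiv (lo + (lo + 1)) 2 = lo := by omega
        simp only [pyB_children, hmid]
        simp
      have hmidne : ∀ p ∈ q1, PySem.Int.floordiv (p.1 + p.2) 2 ≠ 0 := by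
        intro p hp
        have hc := hq1 p hp
        have hb := mid_bounds p.1 p.2
        omega
      have hfage : q1.length + 2 ≤ fa := by
        rw [hSS] at hfa
        simp only [List.length_append, List.length_cons, List.length_nil] at hfa
        push_cast at hfa
        omega
      have hlen : q1.length + (fa - q1.length) = fa := by omega
      rw [← hlen, stepA q1 (fa - q1.length) _ [(0,1)] hmidne, hch]
      obtain ⟨f0, hf0⟩ : ∃ f0, fa - q1.length = f0 + 1 := ⟨fa - q1.length - 1, by omega⟩
      rw [hf0]
      simp only [pyA_loop, List.append_nil]
      rw [if_pos (show PySem.Int.floordiv (0 + 1) 2 = 0 from hz)]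
      simp [pyB_levels, hlast]
    · -- h ≥ 2: A consumes the full level; recurse on the children level
      have hm1 : 1 ≤ m := by omega
      have hh2 : 2 ≤ h := by omega
      have hmidne : ∀ p ∈ q1 ++ [((0:Int), h)], PySem.Int.floordiv (p.1 + p.2) 2 ≠ 0 := by
        intro p hp
        rcases List.mem_append.1 hp with hp | hp
        · have hc := hq1 p hp
          have hb := mid_bounds p.1 p.2
          omega
        · simp at hp
          subst hp
          exact hz
      set L := q1 ++ [((0:Int), h)] with hL
      set L' := L.flatMap pyB_children with hL'
      -- the children level again ends with its 0-range, now (0, m)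
      have hsplit : L' = (q1.flatMap pyB_children ++
          (if m + 1 ≠ h then [(m + 1, h)] else [])) ++ [((0:Int), m)] := by
        have hc0 : pyB_children (0, h) =
            (if m + 1 ≠ h then [(m + 1, h)] else []) ++ [((0:Int), m)] := by
          simp only [pyB_children, ← hm]
          rw [if_pos (by omega : (0:Int) ≠ m)]
        simp [hL', hL, List.flatMap_append, hc0]
      set q1' := q1.flatMap pyB_children ++ (if m + 1 ≠ h then [(m + 1, h)] else []) with hq1'
      have hfold : q1' ++ [((0:Int), m)] = L' := by rw [hq1', hsplit]
      -- shape conditions for the next level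
      have hq1'cond : ∀ p ∈ q1', 1 ≤ p.1 ∧ p.1 < p.2 ∧ m - 1 ≤ p.2 - p.1 ∧ p.2 - p.1 ≤ m := by
        intro p hp
        rcases List.mem_append.1 hp with hp | hp
        · obtain ⟨q, hq, hpq⟩ := List.mem_flatMap.1 hp
          obtain ⟨lo, hi⟩ := q
          have hc := hq1 (lo, hi) hq
          simp only at hc
          have hb := mid_bounds lo hi
          set m' := PySem.Int.floordiv (lo + hi) 2 with hm'
          simp only [pyB_children, ← hm'] at hpq
          rcases List.mem_append.1 hpq with hpq | hpq
          · by_cases hg : m' + 1 ≠ hi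
            · rw [if_pos hg] at hpq
              simp at hpq
              subst hpq
              simp only
              omega
            · rw [if_neg hg] at hpq; simp at hpq
          · by_cases hg : lo ≠ m'
            · rw [if_pos hg] at hpq
              simp at hpq
              subst hpq
              simp only
              omega
            · rw [if_neg hg] at hpq; simp at hpq
        · by_cases hg : m + 1 ≠ h
          · rw [if_pos hg] at hp
            simp at hp
            subst hp
            simp only
            omega
          · rw [if_neg hg] at hp; simp at hp
      -- fuel accounting
      have hlt : ∀ p ∈ L, p.1 < p.2 := by
        intro p hp
        rcases List.mem_append.1 hp with hp | hp
        · exact (hq1 p hp).2.1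
        · simp at hp; subst hp; simpa using h1
      have hflen : (L'.length : Int) ≤ 2 * L.length := by
        rw [hL']
        exact_mod_cast flat_len L
      have hfsum : sizeSum L' ≤ sizeSum L - L.length := by
        rw [hL']
        exact flat_sizeSum L hlt
      have hsumnn : (0:Int) ≤ sizeSum L := by
        refine List.sum_nonneg ?_
        intro x hx
        obtain ⟨p, hp, rfl⟩ := List.mem_map.1 hx
        have := hlt p hp; omega
      have hfa2 : (L.length : Int) + 2 * sizeSum L ≤ (fa : Int) := hfa
      have hLfa : (L.length : Int) ≤ (fa : Int) := by omega
      have hfaL : L.length + (fa - L.length) = fa := by omega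
      have hcast : ((fa - L.length : Nat) : Int) = (fa : Int) - L.length := by omega
      have hfa' : (L'.length : Int) + 2 * sizeSum L' ≤ ((fa - L.length : Nat) : Int) := by
        rw [hcast]; omega
      -- A eats the whole level
      have hstep := stepA L (fa - L.length) (P ++ L) [] hmidne
      rw [List.append_nil, List.nil_append, ← hL'] at hstep
      -- recurse
      have hrec := ih (fa - L.length) (P ++ L) q1' m hm1 hq1'cond
        (by omega) (by rw [hfold]; exact hfa')
      rw [hfold] at hrec
      -- B performs one loop iteration
      have hBstep : pyB_levels (fb' + 1) L = L ++ pyB_levels fb' L' := by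
        rw [hL, hL']
        exact levels_step fb' q1 h (by simpa [hm] using hz)
      rw [← hfaL, hstep, hrec, hBstep, List.append_assoc]

-- ===== VERDICT (by name: the statement is the Claim_ definition above) =====
theorem middle_order_ranges_py_spec : Claim_equal_middle_order_ranges_py := by
  intro n _ hpre
  unfold Spec_middle_order_ranges_py middle_order_ranges_py middle_order_ranges_py_alt
  by_cases h0 : n = 0
  · subst h0; decide
  · have hn : 1 ≤ n := by
      unfold Pre_middle_order_ranges_py at hpre; omega
    have := main_lemma (n.toNat + 2) (2 * n + 4).toNat [] [] n hn (by simp)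
      (by omega)
      (by
        have : ((2 * n + 4).toNat : Int) = 2 * n + 4 := Int.toNat_of_nonneg (by omega)
        rw [this]
        simp [sizeSum]
        omega)
    simpa using this
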